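-- pv_equiv track=rewrite | github.com/Hajin-Bang/Algorithm | 프로그래머스/1/42862. 체육복/체육복.py | solution
-- ===== SOURCE A (Python) =====
-- def solution(n, lost, reserve):
--     new_lost = []
--     new_reserve = []
--
--     for stu in lost:
--         if stu in reserve:
--             reserve.remove(stu)
--         else:
--             new_lost.append(stu)
--
--
--     new_reserve = reserve
--
--     answer = n - len(new_lost)
--
--     for i in sorted(new_lost):
--         if i - 1 in new_reserve:
--             new_reserve.pop(new_reserve.index(i - 1))
--             answer += 1
--         elif i + 1 in new_reserve:
--             new_reserve.pop(new_reserve.index(i + 1))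
--             answer += 1
--
--     return answer
-- ===== SOURCE B (Python) =====
-- def solution(n, lost, reserve):
--     # Sort-and-merge algorithm: two sorted-merge passes, no membership scans.
--     # (Return value only: A mutates its `reserve` argument, B does not.)
--     L = sorted(lost)
--     R = sorted(reserve)
--     # merge pass 1: multiset differences L-R and R-L, both still sorted
--     i = j = 0
--     L2 = []
--     R2 = []
--     while i < len(L) and j < len(R):
--         if L[i] == R[j]:
--             i += 1
--             j += 1
--         elif L[i] < R[j]:
--             L2.append(L[i])
--             i += 1
--         else:
--             R2.append(R[j])
--             j += 1
--     L2 += L[i:]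
--     R2 += R[j:]
--     # merge pass 2: two-pointer greedy matching of losers to adjacent spares
--     i = j = matched = 0
--     while i < len(L2) and j < len(R2):
--         if abs(L2[i] - R2[j]) <= 1:
--             matched += 1
--             i += 1
--             j += 1
--         elif R2[j] < L2[i]:
--             j += 1
--         else:
--             i += 1
--     return n - len(L2) + matched
-- ===== Notes on version B (the rewrite author's own statement) =====
-- stated objective: faster
-- what changed: Replaces A's membership-scan/remove/pop-index greedy over lists with a sort-then-merge algorithm: one merge pass computes both sorted multiset differences, a second two-pointer merge counts adjacent loser/spare matches.
import Mathlib
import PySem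

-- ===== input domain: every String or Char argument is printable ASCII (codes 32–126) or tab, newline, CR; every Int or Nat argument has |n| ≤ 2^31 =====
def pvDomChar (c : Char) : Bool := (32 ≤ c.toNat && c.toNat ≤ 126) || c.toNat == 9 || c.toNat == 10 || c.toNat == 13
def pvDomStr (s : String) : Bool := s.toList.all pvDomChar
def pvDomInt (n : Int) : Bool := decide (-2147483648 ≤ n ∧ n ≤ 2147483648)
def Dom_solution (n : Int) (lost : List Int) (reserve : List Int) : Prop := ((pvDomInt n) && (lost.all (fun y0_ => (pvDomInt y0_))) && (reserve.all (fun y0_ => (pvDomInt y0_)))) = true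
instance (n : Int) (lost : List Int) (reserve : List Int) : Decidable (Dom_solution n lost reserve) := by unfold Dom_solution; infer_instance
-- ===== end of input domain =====

-- ===== PORT A =====
-- B replaces A's membership-scan greedy with sort-then-merge (two two-pointer merge passes).
-- Return-value equivalence only: Python A mutates its `reserve` argument in place, B does not.

-- A: `new_reserve.pop(new_reserve.index(v))` (guarded by `v in new_reserve`)
def popIndex (xs : List Int) (v : Int) : List Int :=
  match PySem.List.index? xs v with
  | some j =>
    match PySem.List.pop? xs (j : Int) with
    | some r => r.2
    | none => xs
  | none => xs

def solution (n : Int) (lost : List Int) (reserve : List Int) : Int :=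
  let s1 := lost.foldl (fun (st : List Int × List Int) stu =>
      if stu ∈ st.2 then (st.1, (PySem.List.remove? st.2 stu).getD st.2)
      else (st.1 ++ [stu], st.2)) ([], reserve)
  let newLost := s1.1
  let answer := n - PySem.List.len newLost
  let s2 := (PySem.List.sorted newLost (fun x => x) false).foldl
      (fun (st : Int × List Int) i =>
        if i - 1 ∈ st.2 then (st.1 + 1, popIndex st.2 (i - 1))
        else if i + 1 ∈ st.2 then (st.1 + 1, popIndex st.2 (i + 1))
        else st) (answer, s1.2)
  s2.1

-- ===== PORT B =====
-- Source B's first while loop (two-pointer merge over sorted L, R with indices i, j),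
-- rendered as the obvious structural recursion on the two remaining suffixes;
-- the trailing `L2 += L[i:]` / `R2 += R[j:]` are the base cases.
def mergeDiff : List Int → List Int → List Int × List Int
  | [], R => ([], R)
  | l :: L, [] => (l :: L, [])
  | l :: L, r :: R =>
    if l = r then mergeDiff L R
    else if l < r then
      let d := mergeDiff L (r :: R)
      (l :: d.1, d.2)
    else
      let d := mergeDiff (l :: L) R
      (d.1, r :: d.2)
termination_by L R => L.length + R.length

-- Source B's second while loop (two-pointer matching with counter `matched`), same rendering
def tpCount : List Int → List Int → Int
  | [], _ => 0
  | _ :: _, [] => 0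
  | l :: L, r :: R =>
    if (l - r).natAbs ≤ 1 then 1 + tpCount L R
    else if r < l then tpCount (l :: L) R
    else tpCount L (r :: R)
termination_by L R => L.length + R.length

def solution_alt (n : Int) (lost : List Int) (reserve : List Int) : Int :=
  let L := PySem.List.sorted lost (fun x => x) false
  let R := PySem.List.sorted reserve (fun x => x) false
  let d := mergeDiff L R
  n - PySem.List.len d.1 + tpCount d.1 d.2

-- ===== PRECONDITION & SPEC =====
def Spec_solution (n : Int) (lost : List Int) (reserve : List Int) (out : Int) : Prop := out = solution_alt n lost reserve
instance (n : Int) (lost : List Int) (reserve : List Int) (out : Int) : Decidable (Spec_solution n lost reserve out) := by unfold Spec_solution; infer_instance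

-- ===== CLAIM (what is proved, stated in full; the proofs are below) =====
def Claim_equal_solution : Prop := ∀ (n : Int) (lost : List Int) (reserve : List Int), Dom_solution n lost reserve → Spec_solution n lost reserve (solution n lost reserve)

-- ===== LEMMAS AND PROOFS =====

-- abbreviations for the two loop bodies of A (proof-local)
def step1 (st : List Int × List Int) (stu : Int) : List Int × List Int :=
  if stu ∈ st.2 then (st.1, (PySem.List.remove? st.2 stu).getD st.2)
  else (st.1 ++ [stu], st.2)

def step2 (st : Int × List Int) (i : Int) : Int × List Int :=
  if i - 1 ∈ st.2 then (st.1 + 1, popIndex st.2 (i - 1))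
  else if i + 1 ∈ st.2 then (st.1 + 1, popIndex st.2 (i + 1))
  else st

-- multiset arithmetic helpers
theorem cons_sub_of_notMem {a : Int} {s t : Multiset Int} (h : a ∉ t) :
    (a ::ₘ s) - t = a ::ₘ (s - t) := by
  ext x
  have ht : t.count a = 0 := Multiset.count_eq_zero.mpr h
  by_cases hx : x = a
  · subst hx; simp [Multiset.count_sub, ht]
  · simp [Multiset.count_sub, Multiset.count_cons_of_ne hx]

theorem sub_cons_of_mem {a : Int} {s t : Multiset Int} (h : a ∈ t) :
    (a ::ₘ s) - t = s - t.erase a := by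
  conv_lhs => rw [← Multiset.cons_erase h]
  rw [Multiset.sub_cons, Multiset.erase_cons_head]

theorem eraseIdx_append_cons (pre suf : List Int) (v : Int) :
    (pre ++ v :: suf).eraseIdx pre.length = pre ++ suf := by
  induction pre with
  | nil => rfl
  | cons a t ih => simp [ih]

theorem popIndex_eq_erase (xs : List Int) (v : Int) (hv : v ∈ xs) :
    popIndex xs v = xs.erase v := by
  unfold popIndex
  have hs : (PySem.List.index? xs v).isSome := by
    rw [PySem.List.index?_isSome_iff]; exact hv
  obtain ⟨k, hk⟩ := Option.isSome_iff_exists.mp hs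
  obtain ⟨pre, suf, hxs, hlen, hnp⟩ := (PySem.List.index?_eq_some_iff xs v k).mp hk
  have hklt : k < xs.length := by rw [hxs, ← hlen]; simp
  rw [hk]
  simp only [PySem.List.pop?_natCast _ _ hklt]
  subst hxs hlen
  rw [eraseIdx_append_cons, List.erase_append_right _ hnp]
  simp

-- A's first loop computes the two multiset differences
theorem phase1_spec (lost : List Int) : ∀ (nl res : List Int),
    (((lost.foldl step1 (nl, res)).1 : List Int) : Multiset Int)
        = (nl : Multiset Int) + ((lost : Multiset Int) - (res : Multiset Int)) ∧
    (((lost.foldl step1 (nl, res)).2 : List Int) : Multiset Int)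
        = ((res : Multiset Int) - (lost : Multiset Int)) := by
  induction lost with
  | nil => intro nl res; simp
  | cons stu L ih =>
    intro nl res
    simp only [List.foldl_cons, step1]
    by_cases hm : stu ∈ res
    · rw [if_pos hm, PySem.List.remove?_eq_some_erase _ _ hm, Option.getD_some]
      obtain ⟨h1, h2⟩ := ih nl (res.erase stu)
      have hmm : stu ∈ (res : Multiset Int) := by simpa using hm
      refine ⟨?_, ?_⟩
      · rw [h1, ← Multiset.cons_coe, sub_cons_of_mem hmm, ← Multiset.coe_erase]
      · rw [h2, ← Multiset.cons_coe, Multiset.sub_cons, ← Multiset.coe_erase]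
    · rw [if_neg hm]
      obtain ⟨h1, h2⟩ := ih (nl ++ [stu]) res
      have hmm : stu ∉ (res : Multiset Int) := by simpa using hm
      refine ⟨?_, ?_⟩
      · rw [h1, ← Multiset.cons_coe, cons_sub_of_notMem hmm]
        have hns : ((nl ++ [stu] : List Int) : Multiset Int) = (nl : Multiset Int) + {stu} := by
          rfl
        rw [hns, add_assoc, Multiset.singleton_add]
      · rw [h2, ← Multiset.cons_coe, Multiset.sub_cons, Multiset.erase_of_notMem hmm]

-- B's first merge pass: sorted multiset differences
theorem mergeDiff_spec : ∀ (L R : List Int), L.Pairwise (· ≤ ·) → R.Pairwise (· ≤ ·) →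
    (((mergeDiff L R).1 : List Int) : Multiset Int) = (L : Multiset Int) - (R : Multiset Int) ∧
    (((mergeDiff L R).2 : List Int) : Multiset Int) = (R : Multiset Int) - (L : Multiset Int) ∧
    (mergeDiff L R).1.Pairwise (· ≤ ·) ∧ (mergeDiff L R).2.Pairwise (· ≤ ·) := by
  intro L R
  induction L, R using mergeDiff.induct with
  | case1 R => intro _ hR; simp [mergeDiff, hR]
  | case2 l L => intro hL _; simp [mergeDiff, hL]
  | case3 L l R ih =>
    intro hL hR
    obtain ⟨h1, h2, h3, h4⟩ := ih hL.tail hR.tail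
    have hred : mergeDiff (l :: L) (l :: R) = mergeDiff L R := by
      rw [mergeDiff]; simp
    rw [hred]
    refine ⟨?_, ?_, h3, h4⟩
    · rw [h1]
      ext x
      simp only [Multiset.count_sub, ← Multiset.cons_coe, Multiset.count_cons]
      omega
    · rw [h2]
      ext x
      simp only [Multiset.count_sub, ← Multiset.cons_coe, Multiset.count_cons]
      omega
  | case4 l L r R hne hlt ih =>
    intro hL hR
    obtain ⟨h1, h2, h3, h4⟩ := ih hL.tail hR
    have hcnt : (r :: R).count l = 0 := by
      rw [List.count_eq_zero]
      intro hmem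
      rcases List.mem_cons.mp hmem with h | h
      · exact hne h
      · have := (List.pairwise_cons.mp hR).1 l h
        omega
    have hred : mergeDiff (l :: L) (r :: R)
        = (l :: (mergeDiff L (r :: R)).1, (mergeDiff L (r :: R)).2) := by
      rw [mergeDiff]; simp [hne, hlt]
    have hc : ((r :: R : List Int) : Multiset Int).count l = 0 := by
      simpa using hcnt
    rw [hred]
    refine ⟨?_, ?_, ?_, h4⟩
    · ext x
      have e1 := congrArg (Multiset.count x) h1
      simp only [Multiset.count_sub] at e1 hc ⊢
      simp only [← Multiset.cons_coe, Multiset.count_cons] at e1 hc ⊢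
      by_cases hx : x = l
      · subst hx; omega
      · simp only [if_neg hx] at e1 ⊢; omega
    · rw [h2]
      ext x
      simp only [Multiset.count_sub] at hc ⊢
      simp only [← Multiset.cons_coe, Multiset.count_cons] at hc ⊢
      by_cases hx : x = l
      · subst hx; omega
      · simp only [if_neg hx]; omega
    · rw [List.pairwise_cons]
      refine ⟨?_, h3⟩
      intro x hx
      have hxm : x ∈ (mergeDiff L (r :: R)).1 := hx
      have : x ∈ (L : Multiset Int) := by
        have hle : (L : Multiset Int) - ((r :: R : List Int) : Multiset Int) ≤ (L : Multiset Int) :=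
          tsub_le_self
        have : x ∈ (L : Multiset Int) - ((r :: R : List Int) : Multiset Int) := by
          rw [← h1]; simpa using hxm
        exact Multiset.mem_of_le hle this
      exact (List.pairwise_cons.mp hL).1 x (by simpa using this)
  | case5 l L r R hne hnlt ih =>
    intro hL hR
    obtain ⟨h1, h2, h3, h4⟩ := ih hL hR.tail
    have hgt : r < l := by
      rcases lt_trichotomy l r with h | h | h
      · exact absurd h hnlt
      · exact absurd h hne
      · exact h
    have hcnt : (l :: L).count r = 0 := by
      rw [List.count_eq_zero]
      intro hmem
      rcases List.mem_cons.mp hmem with h | h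
      · omega
      · have := (List.pairwise_cons.mp hL).1 r h
        omega
    have hred : mergeDiff (l :: L) (r :: R)
        = ((mergeDiff (l :: L) R).1, r :: (mergeDiff (l :: L) R).2) := by
      rw [mergeDiff]; simp [hne, hnlt]
    have hc : ((l :: L : List Int) : Multiset Int).count r = 0 := by simpa using hcnt
    rw [hred]
    refine ⟨?_, ?_, h3, ?_⟩
    · rw [h1]
      ext x
      simp only [Multiset.count_sub] at hc ⊢
      simp only [← Multiset.cons_coe, Multiset.count_cons] at hc ⊢
      by_cases hx : x = r
      · subst hx; omega
      · simp only [if_neg hx]; omega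
    · ext x
      have e2 := congrArg (Multiset.count x) h2
      simp only [Multiset.count_sub] at e2 hc ⊢
      simp only [← Multiset.cons_coe, Multiset.count_cons] at e2 hc ⊢
      by_cases hx : x = r
      · subst hx; omega
      · simp only [if_neg hx] at e2 ⊢; omega
    · rw [List.pairwise_cons]
      refine ⟨?_, h4⟩
      intro x hx
      have : x ∈ (R : Multiset Int) := by
        have : x ∈ (R : Multiset Int) - ((l :: L : List Int) : Multiset Int) := by
          rw [← h2]; simpa using hx
        exact Multiset.mem_of_le tsub_le_self this
      exact (List.pairwise_cons.mp hR).1 x (by simpa using this)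

-- A's second loop: the count result depends only on the multiset of spares
theorem greedy_nil (L : List Int) : ∀ (ans : Int), (L.foldl step2 (ans, ([] : List Int))).1 = ans := by
  induction L with
  | nil => intro ans; rfl
  | cons i L ih =>
    intro ans
    simp only [List.foldl_cons, step2, List.not_mem_nil, if_false]
    exact ih ans

theorem greedy_perm (L : List Int) : ∀ (ans : Int) (res res' : List Int), res.Perm res' →
    (L.foldl step2 (ans, res)).1 = (L.foldl step2 (ans, res')).1 := by
  induction L with
  | nil => intro ans res res' _; rfl
  | cons i L ih =>
    intro ans res res' hp
    simp only [List.foldl_cons, step2]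
    by_cases h1 : i - 1 ∈ res
    · have h1' : i - 1 ∈ res' := hp.mem_iff.mp h1
      rw [if_pos h1, if_pos h1', popIndex_eq_erase _ _ h1, popIndex_eq_erase _ _ h1']
      exact ih (ans + 1) _ _ (hp.erase _)
    · have h1' : i - 1 ∉ res' := fun h => h1 (hp.mem_iff.mpr h)
      rw [if_neg h1, if_neg h1']
      by_cases h2 : i + 1 ∈ res
      · have h2' : i + 1 ∈ res' := hp.mem_iff.mp h2
        rw [if_pos h2, if_pos h2', popIndex_eq_erase _ _ h2, popIndex_eq_erase _ _ h2']
        exact ih (ans + 1) _ _ (hp.erase _)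
      · have h2' : i + 1 ∉ res' := fun h => h2 (hp.mem_iff.mpr h)
        rw [if_neg h2, if_neg h2']
        exact ih ans _ _ hp

-- a spare strictly below every remaining loser's reach is never touched
theorem greedy_drop_low (L : List Int) : ∀ (r : Int) (R : List Int) (ans : Int),
    (∀ x ∈ L, r + 1 < x) →
    (L.foldl step2 (ans, r :: R)).1 = (L.foldl step2 (ans, R)).1 := by
  induction L with
  | nil => intro r R ans _; rfl
  | cons i L ih =>
    intro r R ans h
    have hi : r + 1 < i := h i (List.mem_cons_self)
    have hne1 : r ≠ i - 1 := by omega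
    have hne2 : r ≠ i + 1 := by omega
    have hm1 : i - 1 ∈ r :: R ↔ i - 1 ∈ R := by
      simp only [List.mem_cons]
      constructor
      · rintro (h | h)
        · omega
        · exact h
      · exact Or.inr
    have hm2 : i + 1 ∈ r :: R ↔ i + 1 ∈ R := by
      simp only [List.mem_cons]
      constructor
      · rintro (h | h)
        · omega
        · exact h
      · exact Or.inr
    simp only [List.foldl_cons, step2]
    by_cases h1 : i - 1 ∈ R
    · rw [if_pos (hm1.mpr h1), if_pos h1, popIndex_eq_erase _ _ (hm1.mpr h1),
        popIndex_eq_erase _ _ h1, List.erase_cons_tail (by simpa using hne1)]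
      exact ih r _ (ans + 1) (fun x hx => h x (List.mem_cons_of_mem _ hx))
    · rw [if_neg (fun hh => h1 (hm1.mp hh)), if_neg h1]
      by_cases h2 : i + 1 ∈ R
      · rw [if_pos (hm2.mpr h2), if_pos h2, popIndex_eq_erase _ _ (hm2.mpr h2),
          popIndex_eq_erase _ _ h2, List.erase_cons_tail (by simpa using hne2)]
        exact ih r _ (ans + 1) (fun x hx => h x (List.mem_cons_of_mem _ hx))
      · rw [if_neg (fun hh => h2 (hm2.mp hh)), if_neg h2]
        exact ih r _ ans (fun x hx => h x (List.mem_cons_of_mem _ hx))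

-- the heart: on sorted, value-disjoint lists A's greedy equals B's two-pointer count
theorem greedy_eq_tp (L : List Int) : ∀ (R : List Int) (ans : Int),
    L.Pairwise (· ≤ ·) → R.Pairwise (· ≤ ·) → (∀ x ∈ L, x ∉ R) →
    (L.foldl step2 (ans, R)).1 = ans + tpCount L R := by
  induction L with
  | nil => intro R ans _ _ _; simp [tpCount]
  | cons l L ihL =>
    intro R
    induction R with
    | nil =>
      intro ans _ _ _
      rw [greedy_nil]
      simp [tpCount]
    | cons r R ihR =>
      intro ans hL hR hdis
      have hlL : ∀ x ∈ L, l ≤ x := (List.pairwise_cons.mp hL).1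
      have hrR : ∀ x ∈ r :: R, r ≤ x := by
        intro x hx
        rcases List.mem_cons.mp hx with rfl | hx
        · exact le_refl _
        · exact (List.pairwise_cons.mp hR).1 x hx
      have hlr : l ≠ r := by
        intro h
        exact hdis l List.mem_cons_self (h ▸ List.mem_cons_self)
      by_cases hr1 : r = l - 1
      · subst hr1
        have hmem : l - 1 ∈ (l - 1) :: R := List.mem_cons_self
        simp only [List.foldl_cons, step2, if_pos hmem,
          popIndex_eq_erase _ _ hmem, List.erase_cons_head]
        rw [ihL R (ans + 1) hL.tail hR.tail
          (fun x hx => fun hm => hdis x (List.mem_cons_of_mem _ hx) (List.mem_cons_of_mem _ hm))]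
        have ht : tpCount (l :: L) ((l - 1) :: R) = 1 + tpCount L R := by
          simp only [tpCount]
          rw [if_pos (by omega)]
        rw [ht]; ring
      · by_cases hr2 : r = l + 1
        · subst hr2
          have hnm : l - 1 ∉ (l + 1) :: R := by
            intro hm
            have := hrR _ hm
            omega
          have hmem : l + 1 ∈ (l + 1) :: R := List.mem_cons_self
          simp only [List.foldl_cons, step2, if_neg hnm, if_pos hmem,
            popIndex_eq_erase _ _ hmem, List.erase_cons_head]
          rw [ihL R (ans + 1) hL.tail hR.tail
            (fun x hx => fun hm => hdis x (List.mem_cons_of_mem _ hx) (List.mem_cons_of_mem _ hm))]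
          have ht : tpCount (l :: L) ((l + 1) :: R) = 1 + tpCount L R := by
            simp only [tpCount]
            rw [if_pos (by omega)]
          rw [ht]; ring
        · by_cases hr3 : r < l - 1
          · rw [greedy_drop_low (l :: L) r R ans
              (fun x hx => by
                rcases List.mem_cons.mp hx with rfl | hx
                · omega
                · have := hlL x hx; omega)]
            rw [ihR ans hL hR.tail
              (fun x hx => fun hm => hdis x hx (List.mem_cons_of_mem _ hm))]
            have ht : tpCount (l :: L) (r :: R) = tpCount (l :: L) R := by
              simp only [tpCount]
              rw [if_neg (by omega), if_pos (by omega)]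
            rw [ht]
          · have hgt : l + 1 < r := by omega
            have hnm1 : l - 1 ∉ r :: R := by
              intro hm; have := hrR _ hm; omega
            have hnm2 : l + 1 ∉ r :: R := by
              intro hm; have := hrR _ hm; omega
            simp only [List.foldl_cons, step2, if_neg hnm1, if_neg hnm2]
            rw [ihL (r :: R) ans hL.tail hR
              (fun x hx => fun hm => hdis x (List.mem_cons_of_mem _ hx) hm)]
            have ht : tpCount (l :: L) (r :: R) = tpCount L (r :: R) := by
              simp only [tpCount]
              rw [if_neg (by omega), if_neg (by omega)]
            rw [ht]

theorem solution_spec : Claim_equal_solution := by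
  intro n lost reserve _
  show solution n lost reserve = solution_alt n lost reserve
  simp only [solution, solution_alt]
  obtain ⟨hnl, hres⟩ := phase1_spec lost [] reserve
  -- names for the intermediate data
  set nl := (lost.foldl step1 ([], reserve)).1 with hnl_def
  set res := (lost.foldl step1 ([], reserve)).2 with hres_def
  set sL := PySem.List.sorted lost (fun x => x) false with hsL_def
  set sR := PySem.List.sorted reserve (fun x => x) false with hsR_def
  have hsLm : ((sL : List Int) : Multiset Int) = (lost : Multiset Int) :=
    Multiset.coe_eq_coe.mpr (PySem.List.sorted_perm lost (fun x => x) false)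
  have hsRm : ((sR : List Int) : Multiset Int) = (reserve : Multiset Int) :=
    Multiset.coe_eq_coe.mpr (PySem.List.sorted_perm reserve (fun x => x) false)
  have hsLp : sL.Pairwise (· ≤ ·) := by
    have := PySem.List.sorted_pairwise lost (fun x => x)
    simpa using this
  have hsRp : sR.Pairwise (· ≤ ·) := by
    have := PySem.List.sorted_pairwise reserve (fun x => x)
    simpa using this
  obtain ⟨hm1, hm2, hp1, hp2⟩ := mergeDiff_spec sL sR hsLp hsRp
  have hnl' : ((nl : List Int) : Multiset Int) = (lost : Multiset Int) - (reserve : Multiset Int) := by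
    rw [hnl]; simp
  have hL2 : (((mergeDiff sL sR).1 : List Int) : Multiset Int) = ((nl : List Int) : Multiset Int) := by
    rw [hm1, hsLm, hsRm, hnl']
  have hR2 : (((mergeDiff sL sR).2 : List Int) : Multiset Int) = ((res : List Int) : Multiset Int) := by
    rw [hm2, hsLm, hsRm, hres]
  have hpermL : (mergeDiff sL sR).1.Perm nl := Multiset.coe_eq_coe.mp hL2
  have hpermR : res.Perm (mergeDiff sL sR).2 := (Multiset.coe_eq_coe.mp hR2).symm
  have hsortnl : PySem.List.sorted nl (fun x => x) false = (mergeDiff sL sR).1 :=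
    PySem.List.sorted_id_eq_of_perm_of_pairwise _ _ hpermL hp1
  have hlen : PySem.List.len nl = PySem.List.len (mergeDiff sL sR).1 := by
    simp only [PySem.List.len_eq]
    exact_mod_cast hpermL.length_eq.symm
  have hdis : ∀ x ∈ (mergeDiff sL sR).1, x ∉ (mergeDiff sL sR).2 := by
    intro x hx hx2
    have c1 : reserve.count x < lost.count x := by
      have : x ∈ (lost : Multiset Int) - (reserve : Multiset Int) := by
        rw [← hnl', ← hL2]
        simpa using hx
      have := Multiset.count_pos.mpr this
      simp only [Multiset.count_sub, Multiset.coe_count] at this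
      omega
    have c2 : lost.count x < reserve.count x := by
      have : x ∈ (reserve : Multiset Int) - (lost : Multiset Int) := by
        rw [← hres, ← hR2]
        simpa using hx2
      have := Multiset.count_pos.mpr this
      simp only [Multiset.count_sub, Multiset.coe_count] at this
      omega
    omega
  calc ((PySem.List.sorted nl (fun x => x) false).foldl step2 (n - PySem.List.len nl, res)).1
      = ((mergeDiff sL sR).1.foldl step2 (n - PySem.List.len nl, res)).1 := by rw [hsortnl]
    _ = ((mergeDiff sL sR).1.foldl step2 (n - PySem.List.len nl, (mergeDiff sL sR).2)).1 :=
        greedy_perm _ _ _ _ hpermR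
    _ = (n - PySem.List.len nl) + tpCount (mergeDiff sL sR).1 (mergeDiff sL sR).2 :=
        greedy_eq_tp _ _ _ hp1 hp2 hdis
    _ = n - PySem.List.len (mergeDiff sL sR).1 + tpCount (mergeDiff sL sR).1 (mergeDiff sL sR).2 := by
        rw [hlen]
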